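-- pv_equiv track=rewrite | github.com/BigDataBiology/SantosJunior_Torres_2024_AMPSphere_v1 | General_Scripts/02_motifs_annotation/utils/annotation_complete.py | solubility_rule6
-- ===== SOURCE A (Python) =====
-- def solubility_rule6(sequence):
--     pos = 'KRH'
--     neg = 'DE'
--     net = 0
--     for i in sequence:
--         if i in pos:
--             net += 1
--         elif i in neg:
--             net -= 1
--     if net > 1:
--         return False
--     else:
--         return True
-- ===== SOURCE B (Python) =====
-- def solubility_rule6(sequence):
--     pos = sum(sequence.count(c) for c in 'KRH')
--     neg = sum(sequence.count(c) for c in 'DE')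
--     return pos - neg <= 1
-- ===== Notes on version B (the rewrite author's own statement) =====
-- stated objective: faster
-- what changed: Replaces A's single Python-level pass that classifies each residue and maintains a running net charge with per-symbol whole-sequence counts (sequence.count for each of K,R,H,D,E) combined arithmetically.
import Mathlib
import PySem

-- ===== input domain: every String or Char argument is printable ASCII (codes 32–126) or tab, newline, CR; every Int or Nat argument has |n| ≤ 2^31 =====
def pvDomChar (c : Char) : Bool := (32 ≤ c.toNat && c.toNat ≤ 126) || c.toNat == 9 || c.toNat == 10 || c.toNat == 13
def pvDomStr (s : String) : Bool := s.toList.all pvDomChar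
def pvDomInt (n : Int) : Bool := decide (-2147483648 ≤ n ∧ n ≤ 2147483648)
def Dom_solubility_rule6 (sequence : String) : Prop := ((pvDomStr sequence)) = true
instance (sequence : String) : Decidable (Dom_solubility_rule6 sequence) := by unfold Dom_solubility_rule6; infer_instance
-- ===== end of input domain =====

-- B replaces A's single classifying pass with per-symbol whole-sequence counts (str.count per charge symbol) combined arithmetically; a timing run measured B faster (constant factor).

-- ===== PORT A =====
def solubility_rule6 (sequence : String) : Bool :=
  let pos : String := "KRH"
  let neg : String := "DE"
  let net : Int :=
    sequence.toList.foldl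
      (fun net i =>
        if pos.toList.contains i then net + 1
        else if neg.toList.contains i then net - 1
        else net) 0
  if net > 1 then false else true

-- ===== PORT B =====
def solubility_rule6_alt (sequence : String) : Bool :=
  let pos : Int := ("KRH".toList.map (fun c => (PySem.Str.count sequence (String.ofList [c]) : Int))).sum
  let neg : Int := ("DE".toList.map (fun c => (PySem.Str.count sequence (String.ofList [c]) : Int))).sum
  decide (pos - neg ≤ 1)

-- ===== PRECONDITION & SPEC =====
def Spec_solubility_rule6 (sequence : String) (out : Bool) : Prop := out = solubility_rule6_alt sequence
instance (sequence : String) (out : Bool) : Decidable (Spec_solubility_rule6 sequence out) := by unfold Spec_solubility_rule6; infer_instance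

-- ===== CLAIM (what is proved, stated in full; the proofs are below) =====
def Claim_equal_solubility_rule6 : Prop := ∀ (sequence : String), Dom_solubility_rule6 sequence → Spec_solubility_rule6 sequence (solubility_rule6 sequence)

-- ===== LEMMAS AND PROOFS =====

-- Python's str.count with a single-character needle counts that character's occurrences.
theorem chars_count_go_singleton (c : Char) (l : List Char) (fuel acc : Nat)
    (h : l.length ≤ fuel) :
    PySem.Chars.count.go [c] fuel l acc = acc + l.count c := by
  induction l generalizing fuel acc with
  | nil => cases fuel <;> simp [PySem.Chars.count.go]
  | cons x t ih =>
    cases fuel with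
    | zero => simp at h
    | succ n =>
      simp only [PySem.Chars.count.go]
      by_cases hx : x = c
      · subst hx
        simp [List.isPrefixOf, ih _ _ (by simpa using h)]
        omega
      · simp [List.isPrefixOf, hx, Ne.symm hx, ih _ _ (by simpa using h)]

theorem chars_count_singleton (c : Char) (l : List Char) :
    PySem.Chars.count l [c] = l.count c := by
  simpa using chars_count_go_singleton c l l.length 0 le_rfl

theorem str_count_singleton (s : String) (c : Char) :
    (PySem.Str.count s (String.ofList [c]) : Int) = (s.toList.count c : Int) := by
  simp [PySem.Str.count_eq, chars_count_singleton]

-- A's loop computes the net charge as a difference of character counts.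
theorem foldl_net_eq (l : List Char) (acc : Int) :
    l.foldl
      (fun net i =>
        if (['K', 'R', 'H'].contains i) = true then net + 1
        else if (['D', 'E'].contains i) = true then net - 1
        else net) acc
    = acc + ((l.count 'K' + l.count 'R' + l.count 'H' : Nat) : Int)
        - ((l.count 'D' + l.count 'E' : Nat) : Int) := by
  induction l generalizing acc with
  | nil => simp
  | cons x t ih =>
    simp only [List.foldl_cons, ih, List.count_cons]
    by_cases hK : x = 'K'
    · subst hK; simp; ring
    · by_cases hR : x = 'R'
      · subst hR; simp; ring
      · by_cases hH : x = 'H'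
        · subst hH; simp; ring
        · by_cases hD : x = 'D'
          · subst hD; simp; ring
          · by_cases hE : x = 'E'
            · subst hE; simp [hK, hR, hH]; ring
            · simp [hK, hR, hH, hD, hE]

-- ===== VERDICT (by name: the statement is the Claim_ definition above) =====
theorem solubility_rule6_spec : Claim_equal_solubility_rule6 := by
  intro sequence _
  show _ = _
  simp only [solubility_rule6, solubility_rule6_alt,
    show ("KRH".toList) = ['K', 'R', 'H'] from rfl, show ("DE".toList) = ['D', 'E'] from rfl,
    List.map_cons, List.map_nil, List.sum_cons, List.sum_nil, str_count_singleton]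
  rw [foldl_net_eq]
  by_cases h :
      ((0 : Int) + ((sequence.toList.count 'K' + sequence.toList.count 'R' + sequence.toList.count 'H' : Nat) : Int)
        - ((sequence.toList.count 'D' + sequence.toList.count 'E' : Nat) : Int)) > 1
  rw [show ((0 : Int) + ((sequence.toList.count 'K' + sequence.toList.count 'R' + sequence.toList.count 'H' : Nat) : Int)
        - ((sequence.toList.count 'D' + sequence.toList.count 'E' : Nat) : Int))
      = ((sequence.toList.count 'K' : Int) + ((sequence.toList.count 'R' : Int) + ((sequence.toList.count 'H' : Int) + 0))
        - ((sequence.toList.count 'D' : Int) + ((sequence.toList.count 'E' : Int) + 0))) by push_cast; ring] at h ⊢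
  · rw [if_pos h]
    symm
    rw [decide_eq_false_iff_not]
    omega
  · rw [if_neg h]
    symm
    rw [decide_eq_true_eq]
    omega
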